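-- pv_equiv track=rewrite | github.com/plahteenlahti/tiras20 | wordpairs.py | count
-- ===== SOURCE A (Python) =====
-- def count(t):
-- 	pairs = {}
-- 	increments = {}
--
-- 	for word in t:
-- 		charSet = frozenset(word)
-- 		if charSet not in pairs:
-- 			pairs[charSet] = 0
-- 			increments[charSet] = 0
-- 		elif charSet in pairs and pairs[charSet] > 0:
-- 			pairs[charSet] += 1 + increments[charSet]
-- 			increments[charSet] += 1
-- 		else:
-- 			pairs[charSet] += 1
-- 			increments[charSet] += 1
--
--
--
--
--
--
--
-- 	return sum(pairs.values())
-- ===== SOURCE B (Python) =====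
-- def count(t):
--     cnt = {}
--     for word in t:
--         k = frozenset(word)
--         cnt[k] = cnt.get(k, 0) + 1
--     return sum(n * (n - 1) // 2 for n in cnt.values())
-- ===== Notes on version B (the rewrite author's own statement) =====
-- stated objective: simpler
-- what changed: B builds one frequency dict of character-sets and returns the closed-form sum of n*(n-1)//2 over group sizes, replacing A's two dicts with incremental triangular-number bookkeeping.
import Mathlib
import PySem

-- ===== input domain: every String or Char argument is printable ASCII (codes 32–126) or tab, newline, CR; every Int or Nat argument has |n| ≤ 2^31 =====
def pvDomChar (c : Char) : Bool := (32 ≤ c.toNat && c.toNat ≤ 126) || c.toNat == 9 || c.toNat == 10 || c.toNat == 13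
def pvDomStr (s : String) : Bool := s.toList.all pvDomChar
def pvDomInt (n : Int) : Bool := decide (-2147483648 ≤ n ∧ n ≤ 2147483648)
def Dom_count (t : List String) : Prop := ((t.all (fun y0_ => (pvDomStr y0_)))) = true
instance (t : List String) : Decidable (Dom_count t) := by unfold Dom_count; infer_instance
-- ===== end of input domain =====

-- B is one frequency dict over character-sets plus the closed form n*(n-1)//2 per group,
-- instead of A's two dicts with incremental triangular-number bookkeeping (same cost; simpler).

-- frozenset(word), modelled by its canonical representative: the sorted list of the word's
-- distinct characters (two frozensets are equal iff their canonical representatives are equal).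
def pyKey (w : String) : List Char :=
  PySem.List.sorted (PySem.Set.ofList w.toList) (fun c => c) false

-- ===== PORT A =====
def count (t : List String) : Int :=
  let st := t.foldl
    (fun (st : PySem.Dict (List Char) Int × PySem.Dict (List Char) Int) word =>
      let pairs := st.1
      let increments := st.2
      let charSet := pyKey word
      if pairs.contains charSet = false then
        (pairs.insert charSet 0, increments.insert charSet 0)
      else if pairs.contains charSet && decide (0 < pairs.getD charSet 0) then
        (pairs.insert charSet (pairs.getD charSet 0 + (1 + increments.getD charSet 0)),
         increments.insert charSet (increments.getD charSet 0 + 1))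
      else
        (pairs.insert charSet (pairs.getD charSet 0 + 1),
         increments.insert charSet (increments.getD charSet 0 + 1)))
    (PySem.Dict.empty, PySem.Dict.empty)
  st.1.values.sum

-- ===== PORT B =====
def count_alt (t : List String) : Int :=
  let cnt := t.foldl
    (fun (d : PySem.Dict (List Char) Int) word =>
      let k := pyKey word
      d.insert k (d.getD k 0 + 1))
    PySem.Dict.empty
  (cnt.values.map (fun n => PySem.Int.floordiv (n * (n - 1)) 2)).sum

-- ===== PRECONDITION & SPEC =====
def Spec_count (t : List String) (out : Int) : Prop := out = count_alt t
instance (t : List String) (out : Int) : Decidable (Spec_count t out) := by unfold Spec_count; infer_instance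

-- ===== CLAIM (what is proved, stated in full; the proofs are below) =====
def Claim_equal_count : Prop := ∀ (t : List String), Dom_count t → Spec_count t (count t)

-- ===== LEMMAS AND PROOFS =====

-- A's loop step, on the precomputed keys
def stepA (st : PySem.Dict (List Char) Int × PySem.Dict (List Char) Int) (k : List Char) :
    PySem.Dict (List Char) Int × PySem.Dict (List Char) Int :=
  let pairs := st.1
  let increments := st.2
  if pairs.contains k = false then
    (pairs.insert k 0, increments.insert k 0)
  else if pairs.contains k && decide (0 < pairs.getD k 0) then
    (pairs.insert k (pairs.getD k 0 + (1 + increments.getD k 0)),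
     increments.insert k (increments.getD k 0 + 1))
  else
    (pairs.insert k (pairs.getD k 0 + 1),
     increments.insert k (increments.getD k 0 + 1))

theorem count_eq_foldl_stepA (t : List String) :
    count t = ((t.map pyKey).foldl stepA (PySem.Dict.empty, PySem.Dict.empty)).1.values.sum := by
  simp [count, List.foldl_map, stepA]

-- the invariant of A's loop: keys = distinct keys seen, pairs[k] = C(n,2), increments[k] = n-1
theorem stepA_invariant (ks : List (List Char)) :
    ((ks.foldl stepA (PySem.Dict.empty, PySem.Dict.empty)).1.keys = PySem.Set.ofList ks
      ∧ (ks.foldl stepA (PySem.Dict.empty, PySem.Dict.empty)).1.keys.Nodup)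
    ∧ (∀ k : List Char,
        (ks.foldl stepA (PySem.Dict.empty, PySem.Dict.empty)).1.getD k 0
          = ((ks.count k).choose 2 : Int)
        ∧ (ks.foldl stepA (PySem.Dict.empty, PySem.Dict.empty)).2.getD k 0
          = (if ks.count k = 0 then 0 else (ks.count k : Int) - 1)) := by
  induction ks using List.reverseRecOn with
  | nil => simp [PySem.Dict.getD_empty, PySem.Dict.keys_empty, PySem.Set.ofList]
  | append_singleton ks k0 ih =>
    obtain ⟨⟨hkeys, hnd⟩, hvals⟩ := ih
    rw [List.foldl_append, List.foldl_cons, List.foldl_nil]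
    set st := ks.foldl stepA (PySem.Dict.empty, PySem.Dict.empty) with hst
    have hcnt_new : ∀ k : List Char, k ≠ k0 → (ks ++ [k0]).count k = ks.count k := by
      intro k hk
      have h' : ¬ k0 = k := fun h => hk h.symm
      simp [List.count_append, h']
    have hcnt0 : (ks ++ [k0]).count k0 = ks.count k0 + 1 := by
      simp [List.count_append]
    by_cases hmem : k0 ∈ ks
    · have hc1 : 1 ≤ ks.count k0 := List.count_pos_iff.mpr hmem
      have hcontains : st.1.contains k0 = true :=
        (PySem.Dict.contains_iff_mem_keys _ _).mpr
          (by rw [hkeys, PySem.Set.mem_ofList]; exact hmem)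
      obtain ⟨hp0, hi0⟩ := hvals k0
      -- the step is an overwrite at k0 in both dicts, with some values v1 v2
      have hshape : ∃ v1 : Int,
          stepA st k0 = (st.1.insert k0 v1, st.2.insert k0 (st.2.getD k0 0 + 1))
          ∧ v1 = ((ks.count k0 + 1).choose 2 : Int) := by
        by_cases hgd : 0 < st.1.getD k0 0
        · refine ⟨st.1.getD k0 0 + (1 + st.2.getD k0 0), by simp [stepA, hcontains, hgd], ?_⟩
          rw [hp0, hi0, if_neg (by omega)]
          have hc2 : 2 ≤ ks.count k0 := by
            by_contra hlt
            have : ks.count k0 = 1 := by omega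
            rw [hp0, this] at hgd; norm_num at hgd
          have hch : (ks.count k0 + 1).choose 2 = (ks.count k0).choose 2 + ks.count k0 := by
            rw [Nat.choose_succ_succ' (ks.count k0) 1, Nat.choose_one_right, Nat.add_comm]
          have hch' : (((ks.count k0 + 1).choose 2 : Nat) : Int)
              = (((ks.count k0).choose 2 : Nat) : Int) + (ks.count k0 : Int) := by
            exact_mod_cast congrArg (fun n : Nat => (n : Int)) hch
          rw [hch']
          ring
        · refine ⟨st.1.getD k0 0 + 1, by simp [stepA, hcontains, hgd], ?_⟩
          have hc1' : ks.count k0 = 1 := by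
            by_contra hne
            have hc2 : 2 ≤ ks.count k0 := by omega
            have : (0:Int) < ((ks.count k0).choose 2 : Int) := by
              exact_mod_cast Nat.choose_pos hc2
            rw [← hp0] at this
            exact hgd this
          rw [hp0, hc1']
          norm_num
      obtain ⟨v1, hstep, hv1⟩ := hshape
      rw [hstep]
      refine ⟨⟨?_, ?_⟩, ?_⟩
      · rw [PySem.Dict.keys_insert_of_contains _ _ hcontains, hkeys,
            PySem.Set.ofList_append]
        simp [PySem.Set.update, PySem.Set.add_of_mem, PySem.Set.mem_ofList, hmem]
      · rw [PySem.Dict.keys_insert_of_contains _ _ hcontains]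
        exact hnd
      · intro k
        by_cases hk : k = k0
        · subst hk
          rw [PySem.Dict.getD_insert_self, PySem.Dict.getD_insert_self, hcnt0, hv1, hi0]
          refine ⟨rfl, ?_⟩
          rw [if_neg (by omega), if_neg (by omega)]
          push_cast
          ring
        · obtain ⟨hp, hi⟩ := hvals k
          rw [PySem.Dict.getD_insert_of_ne _ _ _ hk, PySem.Dict.getD_insert_of_ne _ _ _ hk,
              hcnt_new k hk, hp, hi]
          exact ⟨rfl, rfl⟩
    · -- fresh key: first branch
      have hcontains : st.1.contains k0 = false := by
        by_contra hne
        have h : st.1.contains k0 = true := by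
          revert hne; cases st.1.contains k0 <;> simp
        have := (PySem.Dict.contains_iff_mem_keys _ _).mp h
        rw [hkeys, PySem.Set.mem_ofList] at this
        exact hmem this
      have hstep : stepA st k0 = (st.1.insert k0 0, st.2.insert k0 0) := by
        simp [stepA, hcontains]
      rw [hstep]
      have hnotmem : ¬ k0 ∈ PySem.Set.ofList ks := by
        rw [PySem.Set.mem_ofList]; exact hmem
      refine ⟨⟨?_, ?_⟩, ?_⟩
      · rw [PySem.Dict.keys_insert_of_not_contains _ _ hcontains, hkeys,
            PySem.Set.ofList_append]
        simp only [PySem.Set.update, List.foldl_cons, List.foldl_nil]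
        exact (PySem.Set.add_of_not_mem hnotmem).symm
      · rw [PySem.Dict.keys_insert_of_not_contains _ _ hcontains, hkeys]
        exact List.Nodup.append (by rw [hkeys] at hnd; exact hnd) (List.nodup_singleton k0)
          (by simp [hnotmem])
      · intro k
        by_cases hk : k = k0
        · subst hk
          have hc0 : ks.count k = 0 := List.count_eq_zero.mpr hmem
          rw [PySem.Dict.getD_insert_self, PySem.Dict.getD_insert_self, hcnt0, hc0]
          norm_num
        · obtain ⟨hp, hi⟩ := hvals k
          rw [PySem.Dict.getD_insert_of_ne _ _ _ hk, PySem.Dict.getD_insert_of_ne _ _ _ hk,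
              hcnt_new k hk, hp, hi]
          exact ⟨rfl, rfl⟩

theorem count_alt_eq (t : List String) :
    count_alt t = (((t.map pyKey).foldl
        (fun (d : PySem.Dict (List Char) Int) k => d.insert k (d.getD k 0 + 1))
        PySem.Dict.empty).values.map (fun n => PySem.Int.floordiv (n * (n - 1)) 2)).sum := by
  simp [count_alt, List.foldl_map]

theorem choose_two_eq_floordiv (n : Nat) :
    ((n.choose 2 : Nat) : Int) = PySem.Int.floordiv ((n : Int) * ((n : Int) - 1)) 2 := by
  rcases n with _ | m
  · decide
  · have h1 : ((m + 1 : Nat) : Int) - 1 = (m : Int) := by push_cast; ring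
    have h2 : ((m + 1 : Nat) : Int) * (((m + 1 : Nat) : Int) - 1) = (((m + 1) * m : Nat) : Int) := by
      push_cast; ring
    rw [h2, show (2:Int) = ((2:Nat):Int) from rfl, PySem.Int.floordiv_natCast]
    congr 1
    rw [Nat.choose_two_right]
    simp

-- ===== VERDICT (by name: the statement is the Claim_ definition above) =====
theorem count_spec : Claim_equal_count := by
  intro t _
  unfold Spec_count
  set ks := t.map pyKey with hks
  obtain ⟨⟨hkeys, hnd⟩, hvals⟩ := stepA_invariant ks
  -- A's value
  rw [count_eq_foldl_stepA, ← hks]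
  set stA := ks.foldl stepA (PySem.Dict.empty, PySem.Dict.empty) with hstA
  rw [PySem.Dict.values_eq_map_keys stA.1 hnd 0, hkeys]
  -- B's value
  have hBkeys : (ks.foldl (fun (d : PySem.Dict (List Char) Int) k => d.insert k (d.getD k 0 + 1))
      PySem.Dict.empty).keys = PySem.Set.ofList ks := by
    rw [PySem.Dict.keys_foldl_insert]
    simp [PySem.Set.update, PySem.Dict.keys_empty, PySem.Set.ofList]
  have hBnd : (ks.foldl (fun (d : PySem.Dict (List Char) Int) k => d.insert k (d.getD k 0 + 1))
      PySem.Dict.empty).keys.Nodup := by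
    rw [hBkeys]; exact PySem.Set.nodup_ofList _
  have hBgetD : ∀ k, (ks.foldl (fun (d : PySem.Dict (List Char) Int) k => d.insert k (d.getD k 0 + 1))
      PySem.Dict.empty).getD k 0 = (ks.count k : Int) := by
    intro k
    rw [PySem.Dict.getD_foldl_insert_add_one, PySem.Dict.getD_empty]
    simp
  rw [count_alt_eq, ← hks]
  rw [PySem.Dict.values_eq_map_keys _ hBnd 0, hBkeys]
  rw [List.map_map]
  congr 1
  refine List.map_congr_left ?_
  intro k _
  simp only [Function.comp_apply]
  rw [(hvals k).1, hBgetD k, choose_two_eq_floordiv]
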